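-- pv_equiv track=rewrite | github.com/pypi-data/pypi-mirror-399 | packages/perustats/perustats-0.1.7-py3-none-any.whl/perustats/BCRP/fetcher.py | separar_por_indice
-- ===== SOURCE A (Python) =====
-- from collections import defaultdict
--
-- def separar_por_indice(codigos):
--     """
--     Classify codes by their last character (frequency indicator).
--
--     Args:
--         codigos (list): List of statistical series codes
--
--     Returns:
--         dict: Dictionary with frequency indicators as keys and corresponding codes as values.
--               Valid frequency indicators: 'D' (daily), 'M' (monthly),
--               'Q' (quarterly), 'A' (annual)
--
--     Example:
--         codes = ['PBI_1D', 'IPC_2M', 'EXPORT_1A']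
--         result = DataProcessor.separar_por_indice(codes)
--         # Returns: {'D': ['PBI_1D'], 'M': ['IPC_2M'], 'A': ['EXPORT_1A']}
--     """
--     diccionario = defaultdict(list)
--     indices_validos = {"D", "M", "Q", "A"}
--     for codigo in codigos:
--         last_char = codigo[-1]
--         if last_char in indices_validos:
--             diccionario[last_char].append(codigo)
--     return dict(diccionario)
-- ===== SOURCE B (Python) =====
-- def separar_por_indice(codigos):
--     keyed = [(c[-1], c) for c in codigos]
--     order = []
--     for k, _ in keyed:
--         if k in ("D", "M", "Q", "A") and k not in order:
--             order.append(k)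
--     return {k: [c for kk, c in keyed if kk == k] for k in order}
-- ===== Notes on version B (the rewrite author's own statement) =====
-- stated objective: alternative
-- what changed: Replaces the single defaultdict-classifying pass with a pairing pass, a first-occurrence scan collecting the valid indicators in order, and one filtered scan per indicator in a dict comprehension.
import Mathlib
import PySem

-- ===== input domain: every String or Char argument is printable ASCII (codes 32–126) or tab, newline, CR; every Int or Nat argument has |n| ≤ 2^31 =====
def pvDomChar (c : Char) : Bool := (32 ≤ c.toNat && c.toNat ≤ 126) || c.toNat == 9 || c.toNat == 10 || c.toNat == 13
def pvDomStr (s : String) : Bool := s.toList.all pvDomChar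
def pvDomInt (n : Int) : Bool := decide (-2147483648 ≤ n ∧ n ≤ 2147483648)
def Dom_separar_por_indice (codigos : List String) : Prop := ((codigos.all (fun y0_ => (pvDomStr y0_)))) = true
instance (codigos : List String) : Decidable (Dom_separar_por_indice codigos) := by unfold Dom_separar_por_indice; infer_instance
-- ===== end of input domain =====

-- B replaces A's single defaultdict-classifying pass by a pairing pass, a first-occurrence
-- scan collecting the valid indicators in order, and one filtered scan per indicator
-- (objective: alternative decomposition).

-- ===== PORT A =====
def separar_por_indice (codigos : List String) : List (String × List String) :=
  (codigos.foldl (fun diccionario codigo =>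
      match PySem.Str.pyGet? codigo (-1) with
      | none => diccionario   -- codigo[-1] raises IndexError in Python: excluded by Pre_
      | some ch =>
        let last_char := String.ofList [ch]
        if ["D", "M", "Q", "A"].contains last_char then
          PySem.Dict.modify diccionario last_char [] (fun v => v ++ [codigo])
        else diccionario)
    PySem.Dict.empty).items

-- ===== PORT B =====
-- c[-1] as a one-character string
def pvKey (c : String) : String :=
  match PySem.Str.pyGet? c (-1) with
  | some ch => String.ofList [ch]
  | none => ""   -- c[-1] raises IndexError in Python: excluded by Pre_

def separar_por_indice_alt (codigos : List String) : List (String × List String) :=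
  let keyed := codigos.map (fun c => (pvKey c, c))
  let order := keyed.foldl (fun order p =>
      if ["D", "M", "Q", "A"].contains p.1 && !(order.contains p.1) then order ++ [p.1]
      else order) []
  order.map (fun k => (k, (keyed.filter (fun p => p.1 == k)).map (fun p => p.2)))

-- ===== PRECONDITION & SPEC =====
-- Pre_ excludes lists containing the empty string, on which the Python A raises IndexError at codigo[-1] (B raises there too).
def Pre_separar_por_indice (codigos : List String) : Prop := "" ∉ codigos
instance (codigos : List String) : Decidable (Pre_separar_por_indice codigos) := by
  unfold Pre_separar_por_indice; infer_instance

def pvWitness_separar_por_indice : List String := ["PBI_1D", "IPC_2M", "EXPORT_1A", "z"]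

def Spec_separar_por_indice (codigos : List String) (out : List (String × List String)) : Prop := out = separar_por_indice_alt codigos
instance (codigos : List String) (out : List (String × List String)) : Decidable (Spec_separar_por_indice codigos out) := by unfold Spec_separar_por_indice; infer_instance

-- ===== CLAIM (what is proved, stated in full; the proofs are below) =====
def Claim_equal_separar_por_indice : Prop := ∀ (codigos : List String), Dom_separar_por_indice codigos → Pre_separar_por_indice codigos → Spec_separar_por_indice codigos (separar_por_indice codigos)

-- ===== LEMMAS AND PROOFS =====

-- a fold that skips entries failing p is a fold over the p-filtered list
theorem pv_foldl_if_filter {α β : Type} (p : β → Bool) (f : α → β → α) :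
    ∀ (l : List β) (a : α),
      l.foldl (fun acc x => if p x then f acc x else acc) a = (l.filter p).foldl f a := by
  intro l
  induction l with
  | nil => intro a; rfl
  | cons x xs ih =>
    intro a
    by_cases h : p x = true
    · rw [List.foldl_cons, List.filter_cons_of_pos h, List.foldl_cons]
      simp only [h, if_true]
      exact ih _
    · rw [List.foldl_cons, List.filter_cons_of_neg h]
      simp only [h, Bool.false_eq_true, if_false]
      exact ih _

-- B's order loop computes the set of first occurrences of the valid keys
theorem pv_order_eq_update (l : List (String × String)) :
    ∀ (s : List String),
      l.foldl (fun order p =>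
          if ["D", "M", "Q", "A"].contains p.1 && !(order.contains p.1) then order ++ [p.1]
          else order) s
        = PySem.Set.update s
            ((l.filter (fun p => ["D", "M", "Q", "A"].contains p.1)).map (fun p => p.1)) := by
  induction l with
  | nil => intro s; simp [PySem.Set.update_nil]
  | cons x xs ih =>
    intro s
    rw [List.foldl_cons]
    by_cases hv : ["D", "M", "Q", "A"].contains x.1 = true
    · rw [List.filter_cons_of_pos (p := fun p : String × String => ["D", "M", "Q", "A"].contains p.1) hv,
        List.map_cons, PySem.Set.update_cons]
      by_cases hm : x.1 ∈ s
      · have hcond : (["D", "M", "Q", "A"].contains x.1 && !(s.contains x.1)) = false := by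
          simp [hm]
        simp only [hcond, Bool.false_eq_true, if_false]
        rw [ih, PySem.Set.add_of_mem hm]
      · have hcond : (["D", "M", "Q", "A"].contains x.1 && !(s.contains x.1)) = true := by
          rw [hv, Bool.true_and]
          simpa using hm
        simp only [hcond, if_true]
        rw [ih, PySem.Set.add_of_not_mem hm]
    · have hv' : ["D", "M", "Q", "A"].contains x.1 = false := by simpa using hv
      rw [List.filter_cons_of_neg (p := fun p : String × String => ["D", "M", "Q", "A"].contains p.1) hv]
      have hcond : (["D", "M", "Q", "A"].contains x.1 && !(s.contains x.1)) = false := by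
        rw [hv', Bool.false_and]
      simp only [hcond, Bool.false_eq_true, if_false]
      exact ih s

-- A's loop step, written on the (key, code) pair
theorem pv_stepA_eq (d : PySem.Dict String (List String)) (c : String) :
    (match PySem.Str.pyGet? c (-1) with
      | none => d
      | some ch =>
        let last_char := String.ofList [ch]
        if ["D", "M", "Q", "A"].contains last_char then
          PySem.Dict.modify d last_char [] (fun v => v ++ [c])
        else d)
      = (if ["D", "M", "Q", "A"].contains (pvKey c) then
          PySem.Dict.modify d (pvKey c) [] (fun v => v ++ [c])
        else d) := by
  unfold pvKey
  cases h : PySem.Str.pyGet? c (-1) with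
  | none => simp
  | some ch => simp

theorem separar_por_indice_eq_alt (codigos : List String) :
    separar_por_indice codigos = separar_por_indice_alt codigos := by
  unfold separar_por_indice separar_por_indice_alt
  dsimp only
  set keyed := codigos.map (fun c => (pvKey c, c)) with hkeyed
  set keyedV := keyed.filter (fun p => ["D", "M", "Q", "A"].contains p.1) with hkeyedV
  -- A's fold is a fold over the valid keyed entries
  have hA : (codigos.foldl (fun diccionario codigo =>
      match PySem.Str.pyGet? codigo (-1) with
      | none => diccionario
      | some ch =>
        let last_char := String.ofList [ch]
        if ["D", "M", "Q", "A"].contains last_char then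
          PySem.Dict.modify diccionario last_char [] (fun v => v ++ [codigo])
        else diccionario)
    PySem.Dict.empty)
      = keyedV.foldl (fun d p => PySem.Dict.modify d p.1 [] (fun v => v ++ [p.2]))
          PySem.Dict.empty := by
    rw [hkeyedV, hkeyed,
      ← pv_foldl_if_filter (fun p : String × String => ["D", "M", "Q", "A"].contains p.1)
        (fun d p => PySem.Dict.modify d p.1 [] (fun v => v ++ [p.2])), List.foldl_map]
    congr 1
    funext d c
    exact pv_stepA_eq d c
  rw [hA]
  -- both sides are maps over the same key list
  have hnd : (keyedV.foldl (fun d p => PySem.Dict.modify d p.1 [] (fun v => v ++ [p.2]))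
      PySem.Dict.empty).keys.Nodup := by
    exact PySem.Dict.nodup_keys_foldl_modify_key keyedV (fun p => p.1) []
      (fun _ p => fun v => v ++ [p.2]) PySem.Dict.empty (by simp [PySem.Dict.keys_empty])
  rw [PySem.Dict.items_eq_map_keys _ hnd []]
  rw [PySem.Dict.keys_foldl_modify_key keyedV (fun p => p.1) []
    (fun _ p => fun v => v ++ [p.2]) PySem.Dict.empty]
  rw [PySem.Dict.keys_empty, PySem.Set.update_nil_left]
  rw [pv_order_eq_update keyed []]
  rw [PySem.Set.update_nil_left, ← hkeyedV]
  apply List.map_congr_left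
  intro k hk
  have hkv : ["D", "M", "Q", "A"].contains k = true := by
    rw [PySem.Set.mem_ofList] at hk
    obtain ⟨p, hp, rfl⟩ := List.mem_map.mp hk
    rw [hkeyedV] at hp
    exact (List.mem_filter.mp hp).2
  rw [PySem.Dict.getD_foldl_modify_append, PySem.Dict.getD_empty, List.nil_append]
  rw [hkeyedV, List.filter_filter]
  congr 2
  apply List.filter_congr
  intro p _
  by_cases h : p.1 = k
  · rw [h, hkv]
    simp
  · simp [h]

-- ===== VERDICT (by name: the statement is the Claim_ definition above) =====
theorem separar_por_indice_spec : Claim_equal_separar_por_indice := by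
  intro codigos _ _
  unfold Spec_separar_por_indice
  exact separar_por_indice_eq_alt codigos
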